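-- pv_equiv track=rewrite | github.com/ahmedwaelabouzeid-arch/Superpermutations | GreedyPeriodicLookAhead.py | build_min_transition
-- ===== SOURCE A (Python) =====
-- def compute_overlap(a, b):
--     """Return overlap length between two permutations."""
--     for i in range(1, len(a)):
--         if a[i:] == b[:len(a)-i]:
--             return len(a) - i
--     return 0
--
-- def build_min_transition(perms):
--     """Build minimum transition table (how many new chars needed)."""
--     min_transition = {}
--     for a in perms:
--         min_transition[a] = {}
--         for b in perms:
--             if a == b:
--                 continue
--             ov = compute_overlap(a, b)
--             min_transition[a][b] = len(b) - ov
--     return min_transition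
-- ===== SOURCE B (Python) =====
-- def build_min_transition(perms):
--     """Build minimum transition table (how many new chars needed)."""
--     # index every nonempty prefix of every perm once
--     pref = {}
--     for b in perms:
--         for k in range(1, len(b) + 1):
--             pref.setdefault(b[:k], []).append(b)
--     table = {}
--     for a in perms:
--         ovs = {}
--         for i in range(1, len(a)):
--             for b in pref.get(a[i:], []):
--                 if b != a and b not in ovs:
--                     ovs[b] = len(a) - i
--         row = {}
--         for b in perms:
--             if b != a:
--                 row[b] = len(b) - ovs.get(b, 0)
--         table[a] = row
--     return table
-- ===== Notes on version B (the rewrite author's own statement) =====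
-- stated objective: faster
-- what changed: Replaces the per-pair suffix/prefix slice-comparison scan by a hash index built once from every prefix of every perm; for each a its suffixes are looked up longest-first, so the inner scan over all b disappears.
import Mathlib
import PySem

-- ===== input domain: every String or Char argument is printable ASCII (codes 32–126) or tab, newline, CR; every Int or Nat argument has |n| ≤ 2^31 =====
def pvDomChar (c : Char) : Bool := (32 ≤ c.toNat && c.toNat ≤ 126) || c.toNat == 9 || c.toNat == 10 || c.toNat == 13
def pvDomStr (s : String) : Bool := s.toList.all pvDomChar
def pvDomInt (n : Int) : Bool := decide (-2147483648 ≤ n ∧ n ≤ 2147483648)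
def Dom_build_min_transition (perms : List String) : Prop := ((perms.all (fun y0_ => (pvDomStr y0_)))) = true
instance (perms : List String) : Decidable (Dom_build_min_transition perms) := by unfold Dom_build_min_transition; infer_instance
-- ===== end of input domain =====

-- B replaces A's per-pair suffix/prefix slice scan by a prefix hash index built once, so the inner
-- scan over all b disappears (measured faster; asymptotically O(P·n²+P²·n) vs O(P²·n²)).

-- ===== PORT A =====
def compute_overlap_go (a b : String) : List Int → Int
  | [] => 0
  | i :: rest =>
    if PySem.Str.slice a (some i) none = PySem.Str.slice b none (some (PySem.Str.len a - i))
    then PySem.Str.len a - i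
    else compute_overlap_go a b rest

def compute_overlap (a b : String) : Int :=
  compute_overlap_go a b (PySem.List.pyRange 1 (PySem.Str.len a))

def build_min_transition (perms : List String) : List (String × List (String × Int)) :=
  -- Python mutates the dict object min_transition[a] in place; here min_transition[a][b] = v is
  -- mt.modify a {} (·.insert b v), which is exact (the inner loop only writes the entry at a).
  (perms.foldl (fun mt a =>
      perms.foldl (fun mt b =>
        if a = b then mt
        else mt.modify a PySem.Dict.empty
          (fun row => row.insert b (PySem.Str.len b - compute_overlap a b)))
        (mt.insert a PySem.Dict.empty))
    (PySem.Dict.empty : PySem.Dict String (PySem.Dict String Int))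
  ).items.map (fun p => (p.1, p.2.items))

-- ===== PORT B =====
-- pref: every nonempty prefix of every perm ↦ the perms (in order) having that prefix
def pv_pref (perms : List String) : PySem.Dict String (List String) :=
  perms.foldl (fun pref b =>
    (PySem.List.pyRange 1 (PySem.Str.len b + 1)).foldl (fun pref k =>
      pref.modify (PySem.Str.slice b none (some k)) [] (fun l => l ++ [b])) pref)
    PySem.Dict.empty

-- ovs: walking a's suffixes longest-first, first hit per b wins
def pv_ovs (pref : PySem.Dict String (List String)) (a : String) : PySem.Dict String Int :=
  (PySem.List.pyRange 1 (PySem.Str.len a)).foldl (fun ovs i =>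
    (pref.getD (PySem.Str.slice a (some i) none) []).foldl (fun ovs b =>
      if b ≠ a ∧ ovs.contains b = false then ovs.insert b (PySem.Str.len a - i) else ovs) ovs)
    PySem.Dict.empty

def pv_row (perms : List String) (a : String) (ovs : PySem.Dict String Int) : PySem.Dict String Int :=
  perms.foldl (fun row b =>
    if b ≠ a then row.insert b (PySem.Str.len b - ovs.getD b 0) else row) PySem.Dict.empty

def build_min_transition_alt (perms : List String) : List (String × List (String × Int)) :=
  let pref := pv_pref perms
  (perms.foldl (fun table a => table.insert a (pv_row perms a (pv_ovs pref a)))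
    (PySem.Dict.empty : PySem.Dict String (PySem.Dict String Int))
  ).items.map (fun p => (p.1, p.2.items))

-- ===== PRECONDITION & SPEC =====
def Spec_build_min_transition (perms : List String) (out : List (String × List (String × Int))) : Prop := out = build_min_transition_alt perms
instance (perms : List String) (out : List (String × List (String × Int))) : Decidable (Spec_build_min_transition perms out) := by unfold Spec_build_min_transition; infer_instance

-- ===== CLAIM (what is proved, stated in full; the proofs are below) =====
def Claim_equal_build_min_transition : Prop := ∀ (perms : List String), Dom_build_min_transition perms → Spec_build_min_transition perms (build_min_transition perms)

-- ===== LEMMAS AND PROOFS =====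

-- membership in the prefix index
theorem mem_pv_pref (perms : List String) (s b : String) :
    b ∈ (pv_pref perms).getD s [] ↔
      b ∈ perms ∧ ∃ k : Int, 1 ≤ k ∧ k < PySem.Str.len b + 1 ∧ PySem.Str.slice b none (some k) = s := by
  have E : pv_pref perms = (perms.flatMap (fun b' => (PySem.List.pyRange 1 (PySem.Str.len b' + 1)).map
        (fun k => (PySem.Str.slice b' none (some k), b')))).foldl
        (fun d p => d.modify p.1 [] (fun l => l ++ [p.2])) PySem.Dict.empty := by
    rw [List.foldl_flatMap]
    simp only [List.foldl_map]
    rfl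
  rw [E, PySem.Dict.getD_foldl_modify_append]
  simp only [PySem.Dict.getD_empty, List.nil_append, List.mem_map, List.mem_filter,
    List.mem_flatMap, PySem.List.mem_pyRange_one]
  constructor
  · rintro ⟨⟨s', b'⟩, ⟨⟨b0, hb0, ⟨k, hk, hpair⟩⟩, hps⟩, rfl⟩
    obtain ⟨rfl, rfl⟩ := Prod.mk.injEq .. ▸ hpair
    exact ⟨hb0, k, hk.1, hk.2, beq_iff_eq.mp hps⟩
  · rintro ⟨hb, k, hk1, hk2, hks⟩
    exact ⟨(s, b), ⟨⟨b, hb, ⟨k, ⟨hk1, hk2⟩, by rw [hks]⟩⟩, by simp⟩, rfl⟩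

-- the slice test of A ⇔ a proper suffix of a is an indexed prefix of b
theorem cond_iff (a b : String) (i : Int) (h1 : 1 ≤ i) (h2 : i < PySem.Str.len a) :
    (∃ k : Int, 1 ≤ k ∧ k < PySem.Str.len b + 1 ∧
        PySem.Str.slice b none (some k) = PySem.Str.slice a (some i) none) ↔
      PySem.Str.slice a (some i) none = PySem.Str.slice b none (some (PySem.Str.len a - i)) := by
  have hla := PySem.Str.len_eq a
  have hlb := PySem.Str.len_eq b
  have hsa : (PySem.Str.slice a (some i) none).toList = a.toList.drop i.toNat := by
    rw [PySem.Str.toList_slice, PySem.Chars.slice_eq_listSlice, PySem.List.slice_from _ (by omega)]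
  have hsb' : (PySem.Str.slice b none (some (PySem.Str.len a - i))).toList
      = b.toList.take (PySem.Str.len a - i).toNat := by
    rw [PySem.Str.toList_slice, PySem.Chars.slice_eq_listSlice, PySem.List.slice_to _ (by omega)]
  constructor
  · rintro ⟨k, hk1, hk2, hkeq⟩
    have hsb : (PySem.Str.slice b none (some k)).toList = b.toList.take k.toNat := by
      rw [PySem.Str.toList_slice, PySem.Chars.slice_eq_listSlice, PySem.List.slice_to _ (by omega)]
    have hkeq' := congrArg String.toList hkeq
    rw [hsb, hsa] at hkeq'
    have hl := congrArg List.length hkeq'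
    simp only [List.length_take, List.length_drop] at hl
    have hk : k = PySem.Str.len a - i := by omega
    rw [← String.toList_inj, hsa, hsb', ← hk]
    exact hkeq'.symm
  · intro h
    have h' := congrArg String.toList h
    rw [hsa, hsb'] at h'
    have hl := congrArg List.length h'
    simp only [List.length_take, List.length_drop] at hl
    exact ⟨PySem.Str.len a - i, by omega, by omega, h.symm⟩

-- innermost loop of B: effect on one key
theorem inner_get? (L : List String) (a b : String) (v : Int) (d : PySem.Dict String Int) :
    (L.foldl (fun ovs b' => if b' ≠ a ∧ ovs.contains b' = false then ovs.insert b' v else ovs) d).get? b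
      = if b ∈ L ∧ b ≠ a ∧ d.contains b = false then some v else d.get? b := by
  induction L generalizing d with
  | nil => simp
  | cons x xs ih =>
    simp only [List.foldl_cons]
    rw [ih]
    by_cases hx : x ≠ a ∧ d.contains x = false
    · rw [if_pos hx]
      by_cases hbx : b = x
      · subst hbx
        have hc : (d.insert b v).contains b = true := PySem.Dict.contains_insert_self d b v
        simp [hc, List.mem_cons, hx.1, hx.2]
      · have hc : (d.insert x v).contains b = d.contains b := by
          simp [PySem.Dict.contains_insert, hbx]
        simp [hc, PySem.Dict.get?_insert, hbx, List.mem_cons]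
    · rw [if_neg hx]
      by_cases hbx : b = x
      · subst hbx
        push Not at hx
        by_cases hba : b = a
        · simp [hba, List.mem_cons]
        · have : d.contains b = true := Bool.ne_false_iff.mp (hx hba)
          simp [List.mem_cons, this]
      · simp [List.mem_cons, hbx]

-- first matching suffix along a list of cut points
def firstOv (pref : PySem.Dict String (List String)) (a b : String) : List Int → Option Int
  | [] => none
  | i :: r =>
    if b ∈ pref.getD (PySem.Str.slice a (some i) none) [] ∧ b ≠ a
    then some (PySem.Str.len a - i) else firstOv pref a b r

theorem middle_get? (pref : PySem.Dict String (List String)) (a b : String)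
    (is : List Int) (d : PySem.Dict String Int) :
    ((is.foldl (fun ovs i =>
        (pref.getD (PySem.Str.slice a (some i) none) []).foldl (fun ovs b' =>
          if b' ≠ a ∧ ovs.contains b' = false then ovs.insert b' (PySem.Str.len a - i) else ovs) ovs) d).get? b)
      = if d.contains b = true then d.get? b else firstOv pref a b is := by
  induction is generalizing d with
  | nil =>
    simp only [List.foldl_nil, firstOv]
    by_cases h : d.contains b = true
    · rw [if_pos h]
    · rw [if_neg h]
      rw [Bool.not_eq_true] at h
      have hs := PySem.Dict.contains_eq_isSome_get? d b
      rw [h] at hs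
      exact Option.not_isSome_iff_eq_none.mp (by rw [← hs]; simp)
  | cons i r ih =>
    simp only [List.foldl_cons]
    set d1 := (pref.getD (PySem.Str.slice a (some i) none) []).foldl (fun ovs b' =>
          if b' ≠ a ∧ ovs.contains b' = false then ovs.insert b' (PySem.Str.len a - i) else ovs) d with hd1
    rw [ih]
    have hg : d1.get? b = if b ∈ pref.getD (PySem.Str.slice a (some i) none) [] ∧ b ≠ a ∧ d.contains b = false
        then some (PySem.Str.len a - i) else d.get? b := by
      rw [hd1]; exact inner_get? _ a b _ d
    by_cases hdb : d.contains b = true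
    · have h1 : d1.get? b = d.get? b := by rw [hg, if_neg]; simp [hdb]
      have h2 : d1.contains b = true := by
        rw [PySem.Dict.contains_eq_isSome_get?, h1, ← PySem.Dict.contains_eq_isSome_get?]; exact hdb
      rw [if_pos h2, if_pos hdb, h1]
    · rw [Bool.not_eq_true] at hdb
      by_cases hM : b ∈ pref.getD (PySem.Str.slice a (some i) none) [] ∧ b ≠ a
      · have h1 : d1.get? b = some (PySem.Str.len a - i) := by
          rw [hg, if_pos ⟨hM.1, hM.2, hdb⟩]
        have h2 : d1.contains b = true := by
          rw [PySem.Dict.contains_eq_isSome_get?, h1]; rfl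
        rw [if_pos h2, h1, if_neg (by rw [hdb]; simp), firstOv, if_pos hM]
      · have h1 : d1.get? b = d.get? b := by
          rw [hg, if_neg]; intro h; exact hM ⟨h.1, h.2.1⟩
        have h2 : d1.contains b = false := by
          rw [PySem.Dict.contains_eq_isSome_get?, h1, ← PySem.Dict.contains_eq_isSome_get?]; exact hdb
        rw [if_neg (by rw [h2]; simp), if_neg (by rw [hdb]; simp), firstOv, if_neg hM]

theorem firstOv_eq_go (perms : List String) (a b : String) (hb : b ∈ perms) (hne : b ≠ a)
    (is : List Int) (his : ∀ i ∈ is, 1 ≤ i ∧ i < PySem.Str.len a) :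
    (firstOv (pv_pref perms) a b is).getD 0 = compute_overlap_go a b is := by
  induction is with
  | nil => rfl
  | cons i r ih =>
    obtain ⟨hi1, hi2⟩ := his i List.mem_cons_self
    have hcnd : (b ∈ (pv_pref perms).getD (PySem.Str.slice a (some i) none) [] ∧ b ≠ a)
        ↔ PySem.Str.slice a (some i) none = PySem.Str.slice b none (some (PySem.Str.len a - i)) := by
      rw [mem_pv_pref]
      constructor
      · rintro ⟨⟨_, hex⟩, _⟩; exact (cond_iff a b i hi1 hi2).mp hex
      · intro h; exact ⟨⟨hb, (cond_iff a b i hi1 hi2).mpr h⟩, hne⟩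
    simp only [firstOv, compute_overlap_go]
    by_cases h : PySem.Str.slice a (some i) none = PySem.Str.slice b none (some (PySem.Str.len a - i))
    · rw [if_pos (hcnd.mpr h), if_pos h]; rfl
    · rw [if_neg (fun hc => h (hcnd.mp hc)), if_neg h]
      exact ih (fun j hj => his j (List.mem_cons_of_mem i hj))

theorem core (perms : List String) (a b : String) (hb : b ∈ perms) (hne : b ≠ a) :
    (pv_ovs (pv_pref perms) a).getD b 0 = compute_overlap a b := by
  unfold pv_ovs compute_overlap
  rw [PySem.Dict.getD_eq_get?_getD, middle_get?,
    if_neg (by rw [PySem.Dict.contains_empty]; simp)]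
  exact firstOv_eq_go perms a b hb hne _
    (fun i hi => PySem.List.mem_pyRange_one.mp hi)

-- A's mutation of min_transition[a] commutes out of its inner loop
theorem a_row_fold (L : List String) (mt : PySem.Dict String (PySem.Dict String Int))
    (a : String) (v : String → Int) (r0 : PySem.Dict String Int) :
    L.foldl (fun mt b => if a = b then mt
        else mt.modify a PySem.Dict.empty (fun row => row.insert b (v b))) (mt.insert a r0)
      = mt.insert a (L.foldl (fun row b => if a = b then row else row.insert b (v b)) r0) := by
  induction L generalizing r0 with
  | nil => simp
  | cons x xs ih =>
    simp only [List.foldl_cons]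
    by_cases hx : a = x
    · rw [if_pos hx, if_pos hx, ih]
    · rw [if_neg hx, if_neg hx]
      have h : (mt.insert a r0).modify a PySem.Dict.empty (fun row => row.insert x (v x))
           = mt.insert a (r0.insert x (v x)) := by
        show (mt.insert a r0).insert a (((mt.insert a r0).getD a PySem.Dict.empty).insert x (v x)) = _
        rw [PySem.Dict.getD_insert_self, PySem.Dict.insert_insert_self]
      rw [h, ih]

theorem row_eq (perms : List String) (a : String) :
    perms.foldl (fun row b => if a = b then row
        else row.insert b (PySem.Str.len b - compute_overlap a b)) PySem.Dict.empty
      = pv_row perms a (pv_ovs (pv_pref perms) a) := by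
  unfold pv_row
  apply PySem.List.foldl_congr_mem
  intro row b hbm
  by_cases hab : a = b
  · simp [hab]
  · rw [if_pos (fun h => hab h.symm), if_neg hab,
      core perms a b hbm (fun h => hab h.symm)]

-- ===== VERDICT (by name: the statement is the Claim_ definition above) =====
theorem build_min_transition_spec : Claim_equal_build_min_transition := by
  intro perms _
  unfold Spec_build_min_transition build_min_transition build_min_transition_alt
  have h : ∀ (mt : PySem.Dict String (PySem.Dict String Int)) (a : String),
      perms.foldl (fun mt b => if a = b then mt
        else mt.modify a PySem.Dict.empty
          (fun row => row.insert b (PySem.Str.len b - compute_overlap a b)))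
        (mt.insert a PySem.Dict.empty)
      = mt.insert a (pv_row perms a (pv_ovs (pv_pref perms) a)) := by
    intro mt a
    rw [a_row_fold perms mt a (fun b => PySem.Str.len b - compute_overlap a b), row_eq]
  rw [PySem.List.foldl_congr_mem perms _ (fun mt a => mt.insert a (pv_row perms a (pv_ovs (pv_pref perms) a))) _
    (by intro mt a _; exact h mt a)]
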